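-- pv_equiv track=rewrite | github.com/RobGruhl/everpeak-comic | layout_engine.py | detect_layout_pattern
-- ===== SOURCE A (Python) =====
-- from typing import List, Dict, Tuple, Optional
--
-- def detect_layout_pattern(panels: List[Dict]) -> str:
--     """
--     Analyze panel aspect ratios and detect optimal layout pattern.
--
--     Returns layout pattern name:
--     - 'all_square': All panels are square
--     - 'wide_top': First panel is wide, rest are square
--     - 'wide_bottom': Last panel is wide, rest are square
--     - 'bookend_wide': First and last panels are wide
--     - 'tall_left': First panel is tall, rest are square
--     - 'tall_left_wide_bottom': First tall, middle square, last wide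
--     - 'splash': Single panel (any aspect ratio)
--     - 'mixed': Complex pattern requiring custom layout
--     """
--     if len(panels) == 1:
--         return 'splash'
--
--     aspects = [p.get('aspect_ratio', 'square') for p in panels]
--
--     # Check for all square
--     if all(a == 'square' for a in aspects):
--         return 'all_square'
--
--     # Check for tall left + wide bottom pattern
--     if aspects[0] == 'tall' and aspects[-1] == 'wide':
--         # Check if middle panels are all square
--         if all(a == 'square' for a in aspects[1:-1]):
--             return 'tall_left_wide_bottom'
--
--     # Check for tall left pattern
--     if aspects[0] == 'tall' and all(a == 'square' for a in aspects[1:]):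
--         return 'tall_left'
--
--     # Check for wide patterns
--     if aspects[0] == 'wide' and aspects[-1] == 'wide':
--         # Check if middle are all square
--         if all(a == 'square' for a in aspects[1:-1]):
--             return 'bookend_wide'
--
--     if aspects[0] == 'wide' and all(a == 'square' for a in aspects[1:]):
--         return 'wide_top'
--
--     if aspects[-1] == 'wide' and all(a == 'square' for a in aspects[:-1]):
--         return 'wide_bottom'
--
--     # Complex mixed pattern
--     return 'mixed'
-- ===== SOURCE B (Python) =====
-- def detect_layout_pattern(panels):
--     """One-pass classification: scan the panels once recording the first and
--     last aspect plus whether any middle panel is non-square, then decide from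
--     a (first, last) lookup table."""
--     n = len(panels)
--     if n == 1:
--         return 'splash'
--     first = last = 'square'
--     nonsq_middle = False
--     for i, p in enumerate(panels):
--         a = p.get('aspect_ratio', 'square')
--         if i == 0:
--             first = a
--         elif i == n - 1:
--             last = a
--         elif a != 'square':
--             nonsq_middle = True
--     if first == 'square' and last == 'square' and not nonsq_middle:
--         return 'all_square'
--     if nonsq_middle:
--         return 'mixed'
--     return {
--         ('tall', 'wide'): 'tall_left_wide_bottom',
--         ('tall', 'square'): 'tall_left',
--         ('wide', 'wide'): 'bookend_wide',
--         ('wide', 'square'): 'wide_top',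
--         ('square', 'wide'): 'wide_bottom',
--     }.get((first, last), 'mixed')
-- ===== Notes on version B (the rewrite author's own statement) =====
-- stated objective: alternative
-- what changed: Replaces A's repeated all(...)-scans over fresh slices (aspects[1:-1], aspects[1:], aspects[:-1]) and the elif guard chain with a single enumerate pass that records first/last aspect and a middle-non-square flag, followed by one (first,last) table lookup.
import Mathlib
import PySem

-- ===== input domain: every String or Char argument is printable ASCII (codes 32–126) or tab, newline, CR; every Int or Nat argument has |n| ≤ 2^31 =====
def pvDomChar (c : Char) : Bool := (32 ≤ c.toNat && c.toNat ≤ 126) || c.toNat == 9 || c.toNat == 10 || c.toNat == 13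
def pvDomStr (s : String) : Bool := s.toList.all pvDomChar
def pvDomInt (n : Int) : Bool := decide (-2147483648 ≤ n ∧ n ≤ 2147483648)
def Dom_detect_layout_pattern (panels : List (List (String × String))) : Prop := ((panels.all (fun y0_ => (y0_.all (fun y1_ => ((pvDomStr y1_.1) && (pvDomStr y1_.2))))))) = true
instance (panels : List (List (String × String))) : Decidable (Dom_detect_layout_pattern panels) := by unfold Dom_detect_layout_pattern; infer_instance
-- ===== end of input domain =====

-- B replaces A's repeated slice scans and guard chain by one enumerate pass plus a (first,last) table lookup; same cost, different structure.

-- ===== PORT A =====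
-- p.get('aspect_ratio', 'square')  (shared by both ports, as both Pythons call it)
def pvGetAspect (p : List (String × String)) : String :=
  PySem.Dict.getD (PySem.Dict.mk p) "aspect_ratio" "square"

-- Literal port of A.  aspects[0] / aspects[-1] / the slices are only evaluated after the
-- all-square check failed, so aspects is nonempty there and the pyGetD default "" is never used.
def detect_layout_pattern (panels : List (List (String × String))) : String :=
  if panels.length == 1 then "splash"
  else
    let aspects := panels.map pvGetAspect
    if aspects.all (fun a => a == "square") then "all_square"
    else if PySem.List.pyGetD aspects 0 "" == "tall" && PySem.List.pyGetD aspects (-1) "" == "wide"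
            && (PySem.List.slice aspects (some 1) (some (-1))).all (fun a => a == "square") then
      "tall_left_wide_bottom"
    else if PySem.List.pyGetD aspects 0 "" == "tall"
            && (PySem.List.slice aspects (some 1) none).all (fun a => a == "square") then
      "tall_left"
    else if PySem.List.pyGetD aspects 0 "" == "wide" && PySem.List.pyGetD aspects (-1) "" == "wide"
            && (PySem.List.slice aspects (some 1) (some (-1))).all (fun a => a == "square") then
      "bookend_wide"
    else if PySem.List.pyGetD aspects 0 "" == "wide"
            && (PySem.List.slice aspects (some 1) none).all (fun a => a == "square") then
      "wide_top"
    else if PySem.List.pyGetD aspects (-1) "" == "wide"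
            && (PySem.List.slice aspects none (some (-1))).all (fun a => a == "square") then
      "wide_bottom"
    else "mixed"

-- ===== PORT B =====
-- the body of B's enumerate loop
def pvStep (n : Int) (st : String × String × Bool) (ip : Int × List (String × String)) :
    String × String × Bool :=
  let a := pvGetAspect ip.2
  if ip.1 == 0 then (a, st.2.1, st.2.2)
  else if ip.1 == n - 1 then (st.1, a, st.2.2)
  else if a != "square" then (st.1, st.2.1, true)
  else st

-- B's literal dict
def pvTable : PySem.Dict (String × String) String :=
  PySem.Dict.ofList
    [(("tall", "wide"), "tall_left_wide_bottom"),
     (("tall", "square"), "tall_left"),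
     (("wide", "wide"), "bookend_wide"),
     (("wide", "square"), "wide_top"),
     (("square", "wide"), "wide_bottom")]

def detect_layout_pattern_alt (panels : List (List (String × String))) : String :=
  let n := panels.length
  if n == 1 then "splash"
  else
    let st := (PySem.List.enumerate panels 0).foldl (pvStep (n : Int)) ("square", "square", false)
    if st.1 == "square" && st.2.1 == "square" && !st.2.2 then "all_square"
    else if st.2.2 then "mixed"
    else PySem.Dict.getD pvTable (st.1, st.2.1) "mixed"

-- ===== PRECONDITION & SPEC =====
def Spec_detect_layout_pattern (panels : List (List (String × String))) (out : String) : Prop := out = detect_layout_pattern_alt panels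
instance (panels : List (List (String × String))) (out : String) : Decidable (Spec_detect_layout_pattern panels out) := by unfold Spec_detect_layout_pattern; infer_instance

-- ===== CLAIM (what is proved, stated in full; the proofs are below) =====
def Claim_equal_detect_layout_pattern : Prop := ∀ (panels : List (List (String × String))), Dom_detect_layout_pattern panels → Spec_detect_layout_pattern panels (detect_layout_pattern panels)

-- ===== LEMMAS AND PROOFS =====

-- slices / indices of A on the shape  x :: ms ++ [z]
lemma pv_slice_mid (x z : String) (ms : List String) :
    PySem.List.slice (x :: (ms ++ [z])) (some 1) (some (-1)) = ms := by
  simp [PySem.List.slice, PySem.List.clampIdx]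
  rw [if_neg (by omega)]
  simp

lemma pv_slice_tail (x z : String) (ms : List String) :
    PySem.List.slice (x :: (ms ++ [z])) (some 1) none = ms ++ [z] := by
  simp [PySem.List.slice, PySem.List.clampIdx]

lemma pv_slice_init (x z : String) (ms : List String) :
    PySem.List.slice (x :: (ms ++ [z])) none (some (-1)) = x :: ms := by
  simp [PySem.List.slice, PySem.List.clampIdx]
  rw [if_neg (by omega)]
  simp

lemma pv_get_head (x z : String) (ms : List String) :
    PySem.List.pyGetD (x :: (ms ++ [z])) 0 "" = x := by
  simp [PySem.List.pyGetD, PySem.List.pyGet?, PySem.List.pyIdx?]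
  rw [if_pos (by omega)]
  simp

lemma pv_get_last (x z : String) (ms : List String) :
    PySem.List.pyGetD (x :: (ms ++ [z])) (-1) "" = z := by
  simp [PySem.List.pyGetD, PySem.List.pyGet?, PySem.List.pyIdx?]

-- B's loop over the middle section only accumulates the non-square flag
lemma pv_fold_mid (n : Int) (ms : List (List (String × String))) (s : Int)
    (f0 l0 : String) (b : Bool) (h1 : 1 ≤ s) (h2 : s + ms.length ≤ n - 1) :
    (PySem.List.enumerate ms s).foldl (pvStep n) (f0, l0, b)
      = (f0, l0, b || ms.any (fun p => pvGetAspect p != "square")) := by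
  induction ms generalizing s b with
  | nil => simp [PySem.List.enumerate]
  | cons m ms ih =>
    have h0 : (s == 0) = false := by simp; omega
    have hn : (s == n - 1) = false := by
      simp only [List.length_cons] at h2; simp; omega
    simp only [PySem.List.enumerate_cons, List.foldl_cons, pvStep, h0, hn,
      Bool.false_eq_true, if_false]
    by_cases hm : pvGetAspect m = "square"
    · rw [if_neg (by simp [hm])]
      rw [ih (s + 1) b (by omega) (by simp only [List.length_cons] at h2; omega)]
      simp [hm]
    · rw [if_pos (by simp [hm])]
      rw [ih (s + 1) true (by omega) (by simp only [List.length_cons] at h2; omega)]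
      simp [hm]

-- B's whole loop on the shape p :: ms ++ [q]
lemma pv_fold_full (p q : List (String × String)) (ms : List (List (String × String))) :
    (PySem.List.enumerate (p :: (ms ++ [q])) 0).foldl
        (pvStep ((p :: (ms ++ [q])).length : Int)) ("square", "square", false)
      = (pvGetAspect p, pvGetAspect q, ms.any (fun m => pvGetAspect m != "square")) := by
  have hn : ((p :: (ms ++ [q])).length : Int) = (ms.length : Int) + 2 := by
    simp; omega
  rw [hn]
  simp only [PySem.List.enumerate_cons, List.foldl_cons]
  have h00 : ((0 : Int) == 0) = true := by simp
  simp only [pvStep, h00, if_true]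
  rw [PySem.List.enumerate_append]
  rw [List.foldl_append]
  norm_num
  rw [pv_fold_mid ((ms.length : Int) + 2) ms 1 (pvGetAspect p) "square" false (by omega) (by omega)]
  have h0 : ((1 + (ms.length : Int)) == 0) = false := by simp; omega
  have hl : ((1 + (ms.length : Int)) == (ms.length : Int) + 2 - 1) = true := by simp; omega
  simp [pvStep, h0, hl]

-- any non-square among ms  =  not all mapped aspects square
lemma pv_any_ms (ms : List (List (String × String))) :
    (ms.any fun m => pvGetAspect m != "square")
      = !((ms.map pvGetAspect).all fun a => a == "square") := by
  induction ms with
  | nil => rfl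
  | cons m ms ih =>
    rw [List.any_cons, List.map_cons, List.all_cons, ih]
    cases hm : pvGetAspect m == "square" <;> simp [bne, hm]

-- pvTable in constructor form, for lookup reasoning
lemma pv_table_eq : pvTable = PySem.Dict.mk
    [(("tall", "wide"), "tall_left_wide_bottom"),
     (("tall", "square"), "tall_left"),
     (("wide", "wide"), "bookend_wide"),
     (("wide", "square"), "wide_top"),
     (("square", "wide"), "wide_bottom")] := by decide

-- the decision on (first, last, middle-all-square) agrees between A's guard chain
-- and B's flag check + table lookup
lemma pv_decide_eq (F L : String) (sA : Bool) :
    (if (F == "square" && (sA && (L == "square"))) = true then "all_square"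
     else if (F == "tall" && L == "wide" && sA) = true then "tall_left_wide_bottom"
     else if (F == "tall" && (sA && (L == "square"))) = true then "tall_left"
     else if (F == "wide" && L == "wide" && sA) = true then "bookend_wide"
     else if (F == "wide" && (sA && (L == "square"))) = true then "wide_top"
     else if (L == "wide" && (F == "square" && sA)) = true then "wide_bottom"
     else "mixed")
    = (if (F == "square" && L == "square" && sA) = true then "all_square"
       else if (!sA) = true then "mixed"
       else PySem.Dict.getD pvTable (F, L) "mixed") := by
  by_cases hs : sA = true
  · subst hs
    by_cases hF : F = "tall"
    · subst hF
      by_cases hL : L = "wide"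
      · subst hL; decide
      · by_cases hL2 : L = "square"
        · subst hL2; decide
        · simp [pv_table_eq, PySem.Dict.getD, PySem.Dict.get?, hL, hL2,
            Ne.symm hL, Ne.symm hL2]
    · by_cases hF2 : F = "wide"
      · subst hF2
        by_cases hL : L = "wide"
        · subst hL; decide
        · by_cases hL2 : L = "square"
          · subst hL2; decide
          · simp [pv_table_eq, PySem.Dict.getD, PySem.Dict.get?, hL, hL2,
              Ne.symm hL, Ne.symm hL2]
      · by_cases hF3 : F = "square"
        · subst hF3
          by_cases hL : L = "wide"
          · subst hL; decide
          · by_cases hL2 : L = "square"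
            · subst hL2; decide
            · simp [pv_table_eq, PySem.Dict.getD, PySem.Dict.get?, hL, hL2,
                Ne.symm hL, Ne.symm hL2]
        · by_cases hL : L = "wide" <;>
            simp [pv_table_eq, PySem.Dict.getD, PySem.Dict.get?, hF, hF2, hF3, hL,
              Ne.symm hF, Ne.symm hF2, Ne.symm hF3]
  · simp only [Bool.not_eq_true] at hs
    subst hs
    simp

-- ===== VERDICT (by name: the statement is the Claim_ definition above) =====
theorem detect_layout_pattern_spec : Claim_equal_detect_layout_pattern := by
  intro panels _
  unfold Spec_detect_layout_pattern
  match panels with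
  | [] => decide
  | [p] => simp [detect_layout_pattern, detect_layout_pattern_alt]
  | p :: rest =>
    rcases List.eq_nil_or_concat rest with rfl | ⟨ms, q, rfl⟩
    · simp [detect_layout_pattern, detect_layout_pattern_alt]
    · simp only [List.concat_eq_append]
      simp only [detect_layout_pattern_alt]
      rw [pv_fold_full]
      have hlen : ((ms.length + (0 + 1) + 1 : Nat) == 1) = false := by simp
      simp only [detect_layout_pattern, List.map_cons, List.map_append, List.map_nil,
        List.length_cons, List.length_append, List.length_nil, List.all_cons, List.all_append,
        List.all_nil, pv_get_head, pv_get_last, pv_slice_mid, pv_slice_tail, pv_slice_init,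
        Bool.and_true, pv_any_ms, Bool.not_not, hlen, Bool.false_eq_true, if_false]
      exact pv_decide_eq (pvGetAspect p) (pvGetAspect q)
        ((ms.map pvGetAspect).all fun a => a == "square")
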